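-- pv_equiv track=rewrite | github.com/tejaskotalwar2003/Project-Phase-II2025 | answer_engine/fibonacci_answers.py | print_fibonacci_between_positions_global
-- ===== SOURCE A (Python) =====
-- def print_fibonacci_between_positions_global(start_pos, end_pos):
--     """Global function to print Fibonacci numbers between positions for internal calculations."""
--     fib_sequence_range = []
--     a, b = 0, 1
--     for i in range(end_pos + 1):
--         if i >= start_pos:
--             fib_sequence_range.append(a)
--         a, b = b, a + b
--     return fib_sequence_range
-- ===== SOURCE B (Python) =====
-- def _fib_pair(n):
--     """Return (F(n), F(n+1)) by fast doubling."""
--     if n == 0: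
--         return (0, 1)
--     a, b = _fib_pair(n >> 1)
--     c = a * (2 * b - a)
--     d = a * a + b * b
--     if n & 1:
--         return (d, c + d)
--     return (c, d)
--
-- def print_fibonacci_between_positions_global(start_pos, end_pos):
--     """Global function to print Fibonacci numbers between positions for internal calculations."""
--     s = start_pos if start_pos > 0 else 0
--     if end_pos < s:
--         return []
--     a, b = _fib_pair(s)
--     out = []
--     for _ in range(end_pos - s + 1):
--         out.append(a)
--         a, b = b, a + b
--     return out
-- ===== Notes on version B (the rewrite author's own statement) =====
-- stated objective: alternative
-- what changed: B computes (F(start), F(start+1)) directly by fast doubling and then iterates only over the requested [start, end] window, instead of A's linear iteration from position 0; cost depends on the window size rather than on end_pos alone (intended as faster; a timing run measured large speed-ups when the window is small but could not confirm it overall).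
import Mathlib
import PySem

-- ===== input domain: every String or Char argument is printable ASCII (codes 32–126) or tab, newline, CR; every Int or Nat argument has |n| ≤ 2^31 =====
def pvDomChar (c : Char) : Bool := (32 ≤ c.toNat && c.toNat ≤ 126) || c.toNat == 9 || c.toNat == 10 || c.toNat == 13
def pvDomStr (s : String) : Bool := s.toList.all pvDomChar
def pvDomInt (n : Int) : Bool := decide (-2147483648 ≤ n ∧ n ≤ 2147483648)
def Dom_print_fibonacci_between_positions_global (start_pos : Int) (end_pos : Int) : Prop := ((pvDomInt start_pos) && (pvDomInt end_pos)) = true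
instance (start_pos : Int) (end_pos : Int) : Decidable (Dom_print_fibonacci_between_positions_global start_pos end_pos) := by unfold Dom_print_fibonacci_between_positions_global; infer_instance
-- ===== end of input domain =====

-- B replaces A's linear scan from position 0 by fast doubling to position max(start_pos,0)
-- followed by iteration over the requested window only (objective: alternative algorithm).

-- ===== PORT A =====
def print_fibonacci_between_positions_global (start_pos : Int) (end_pos : Int) : List Int :=
  let st := (PySem.List.pyRange 0 (end_pos + 1) 1).foldl
    (fun (st : List Int × Int × Int) i =>
      let fib_sequence_range := if start_pos ≤ i then st.1 ++ [st.2.1] else st.1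
      (fib_sequence_range, st.2.2, st.2.1 + st.2.2)) ([], 0, 1)
  st.1

-- ===== PORT B =====
-- fast doubling: returns (F(n), F(n+1))
def pvFibPair : Nat → Int × Int
  | 0 => (0, 1)
  | (m+1) =>
    let p := pvFibPair ((m+1) / 2)
    let a := p.1
    let b := p.2
    let c := a * (2 * b - a)
    let d := a * a + b * b
    if (m+1) % 2 = 1 then (d, c + d) else (c, d)
decreasing_by exact Nat.div_lt_self (Nat.succ_pos m) one_lt_two

-- the append loop of Source B as structural recursion on the iteration count
def pvFibLoop : Nat → Int → Int → List Int
  | 0, _, _ => []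
  | (k+1), a, b => a :: pvFibLoop k b (a + b)

def print_fibonacci_between_positions_global_alt (start_pos : Int) (end_pos : Int) : List Int :=
  let s := if start_pos > 0 then start_pos else 0
  if end_pos < s then []
  else
    let p := pvFibPair s.toNat
    pvFibLoop (end_pos - s + 1).toNat p.1 p.2

-- ===== PRECONDITION & SPEC =====
def Spec_print_fibonacci_between_positions_global (start_pos : Int) (end_pos : Int) (out : List Int) : Prop := out = print_fibonacci_between_positions_global_alt start_pos end_pos
instance (start_pos : Int) (end_pos : Int) (out : List Int) : Decidable (Spec_print_fibonacci_between_positions_global start_pos end_pos out) := by unfold Spec_print_fibonacci_between_positions_global; infer_instance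

-- ===== CLAIM (what is proved, stated in full; the proofs are below) =====
def Claim_equal_print_fibonacci_between_positions_global : Prop := ∀ (start_pos : Int) (end_pos : Int), Dom_print_fibonacci_between_positions_global start_pos end_pos → Spec_print_fibonacci_between_positions_global start_pos end_pos (print_fibonacci_between_positions_global start_pos end_pos)

-- ===== LEMMAS AND PROOFS =====

-- fast doubling computes Fibonacci pairs
theorem pvFibPair_eq (n : Nat) : pvFibPair n = ((Nat.fib n : Int), (Nat.fib (n+1) : Int)) := by
  induction n using Nat.strong_induction_on with
  | _ n ih =>
    match n with
    | 0 => simp [pvFibPair]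
    | (m+1) =>
      rw [pvFibPair, ih ((m+1)/2) (Nat.div_lt_self (Nat.succ_pos m) one_lt_two)]
      have hfl : Nat.fib ((m+1)/2) ≤ 2 * Nat.fib ((m+1)/2 + 1) := by
        have h1 : Nat.fib ((m+1)/2) ≤ Nat.fib ((m+1)/2 + 1) := Nat.fib_mono (by omega)
        omega
      have hc : ((Nat.fib ((m+1)/2) : Int)) * (2 * (Nat.fib ((m+1)/2 + 1) : Int) - (Nat.fib ((m+1)/2) : Int))
          = (Nat.fib (2 * ((m+1)/2)) : Int) := by
        rw [Nat.fib_two_mul, Nat.cast_mul, Nat.cast_sub hfl]; push_cast; ring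
      have hd : ((Nat.fib ((m+1)/2) : Int)) * (Nat.fib ((m+1)/2) : Int)
            + (Nat.fib ((m+1)/2 + 1) : Int) * (Nat.fib ((m+1)/2 + 1) : Int)
          = (Nat.fib (2 * ((m+1)/2) + 1) : Int) := by
        rw [Nat.fib_two_mul_add_one]; push_cast; ring
      rcases Nat.mod_two_eq_zero_or_one (m+1) with hpar | hpar
      · have h2 : m + 1 = 2 * ((m+1)/2) := by omega
        simp only [hpar]
        norm_num
        rw [hc, hd]
        constructor
        · rw [show 2 * ((m+1)/2) = m + 1 from by omega]
        · rw [show 2 * ((m+1)/2) + 1 = m + 1 + 1 from by omega]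
      · have h2 : m + 1 = 2 * ((m+1)/2) + 1 := by omega
        simp only [hpar]
        norm_num
        rw [hc, hd]
        constructor
        · rw [show 2 * ((m+1)/2) + 1 = m + 1 from by omega]
        · rw [show m + 1 + 1 = 2 * ((m+1)/2) + 2 from by omega, Nat.fib_add_two]
          push_cast; ring

-- the window loop produces consecutive Fibonacci numbers
theorem pvFibLoop_eq (k s : Nat) :
    pvFibLoop k (Nat.fib s : Int) (Nat.fib (s+1) : Int)
      = (List.range k).map (fun j => (Nat.fib (s + j) : Int)) := by
  induction k generalizing s with
  | zero => simp [pvFibLoop]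
  | succ k ih =>
    rw [pvFibLoop, show ((Nat.fib s : Int) + (Nat.fib (s+1) : Int)) = (Nat.fib (s+2) : Int) from by
      rw [Nat.fib_add_two]; push_cast; ring]
    rw [ih (s+1), List.range_succ_eq_map]
    simp only [List.map_cons, List.map_map, Nat.add_zero]
    congr 1
    apply List.map_congr_left
    intro j _
    simp only [Function.comp]
    norm_cast
    congr 1
    omega

-- characterisation of A's fold up to bound n
theorem pvA_fold (start_pos : Int) (n : Nat) :
    (PySem.List.pyRange 0 n 1).foldl
      (fun (st : List Int × Int × Int) i =>
        let fib_sequence_range := if start_pos ≤ i then st.1 ++ [st.2.1] else st.1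
        (fib_sequence_range, st.2.2, st.2.1 + st.2.2)) ([], 0, 1)
    = ((PySem.List.pyRange (max start_pos 0) n 1).map (fun i => (Nat.fib i.toNat : Int)),
       (Nat.fib n : Int), (Nat.fib (n+1) : Int)) := by
  induction n with
  | zero =>
    simp only [Nat.cast_zero]
    rw [PySem.List.pyRange_one_eq_nil (le_refl 0), PySem.List.pyRange_one_eq_nil (le_max_right _ _)]
    simp
  | succ n ih =>
    rw [show ((n+1 : Nat) : Int) = (n : Int) + 1 from by push_cast; ring,
        PySem.List.pyRange_one_succ_right (by positivity), List.foldl_append, ih]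
    simp only [List.foldl_cons, List.foldl_nil]
    by_cases h : start_pos ≤ (n : Int)
    · have hm : max start_pos 0 ≤ (n : Int) := by omega
      rw [if_pos h, PySem.List.pyRange_one_succ_right hm, List.map_append]
      refine Prod.ext ?_ (Prod.ext ?_ ?_)
      · simp
      · simp
      · simp only
        rw [show n + 1 + 1 = n + 2 from rfl, Nat.fib_add_two]
        push_cast; ring
    · have hm1 : (n : Int) + 1 ≤ max start_pos 0 := by omega
      have hm0 : (n : Int) ≤ max start_pos 0 := by omega
      rw [if_neg h, PySem.List.pyRange_one_eq_nil hm1, PySem.List.pyRange_one_eq_nil hm0]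
      refine Prod.ext rfl (Prod.ext rfl ?_)
      simp only
      rw [show n + 1 + 1 = n + 2 from rfl, Nat.fib_add_two]
      push_cast; ring

-- ===== VERDICT (by name: the statement is the Claim_ definition above) =====
theorem print_fibonacci_between_positions_global_spec : Claim_equal_print_fibonacci_between_positions_global := by
  intro start_pos end_pos _
  unfold Spec_print_fibonacci_between_positions_global
  unfold print_fibonacci_between_positions_global print_fibonacci_between_positions_global_alt
  simp only
  by_cases hend : end_pos + 1 ≤ 0
  · rw [PySem.List.pyRange_one_eq_nil hend]
    have hs : ¬ ¬ (end_pos < if start_pos > 0 then start_pos else 0) := by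
      split_ifs with h <;> omega
    rw [if_pos (not_not.mp hs)]
    simp
  · push Not at hend
    have hn : end_pos + 1 = ((end_pos + 1).toNat : Int) := by omega
    rw [hn, pvA_fold]
    set s : Int := if start_pos > 0 then start_pos else 0 with hs
    have hmax : max start_pos 0 = s := by simp only [hs]; split_ifs with h <;> omega
    rw [hmax]
    by_cases hlt : end_pos < s
    · rw [if_pos hlt, PySem.List.pyRange_one_eq_nil (by omega)]
      simp
    · push Not at hlt
      have hs0 : 0 ≤ s := by simp only [hs]; split_ifs <;> omega
      rw [if_neg (by omega), pvFibPair_eq, PySem.List.pyRange_one]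
      simp only
      rw [← hn, pvFibLoop_eq ((end_pos - s + 1).toNat) s.toNat]
      rw [show (end_pos + 1 - s).toNat = (end_pos - s + 1).toNat from by omega]
      rw [List.map_map]
      apply List.map_congr_left
      intro j hj
      simp only [List.mem_range] at hj
      simp only [Function.comp_apply]
      rw [show (s + (j:Int)).toNat = s.toNat + j from by omega]
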